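-- pv_equiv track=rewrite | github.com/chequer-io/querypie-docs | confluence-mdx/bin/sync_confluence_url.py | remove_confluence_url
-- ===== SOURCE A (Python) =====
-- from typing import List, Optional, Tuple
--
-- def _find_frontmatter_bounds(lines: List[str]) -> Optional[Tuple[int, int]]:
--     """Return (start, end) line indices of the ``---`` fences, or None."""
--     start: Optional[int] = None
--     for i, line in enumerate(lines):
--         if line.rstrip() == '---':
--             if start is None:
--                 start = i
--             else:
--                 return (start, i)
--     return None
--
-- def remove_confluence_url(lines: List[str]) -> Tuple[List[str], bool]:
--     """Remove ``confluenceUrl`` line from frontmatter if present.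
--
--     Returns (new_lines, changed).
--     """
--     bounds = _find_frontmatter_bounds(lines)
--     if bounds is None:
--         return lines, False
--
--     start, end = bounds
--     for i in range(start + 1, end):
--         if lines[i].strip().startswith('confluenceUrl:'):
--             result = lines[:i] + lines[i + 1:]
--             return result, True
--     return lines, False
-- ===== SOURCE B (Python) =====
-- def remove_confluence_url(lines):
--     """Remove ``confluenceUrl`` line from frontmatter if present.
--
--     Single stateful pass: remember the first fence and the first
--     confluenceUrl candidate after it; decide when the second fence appears.
--     Returns (new_lines, changed).
--     """
--     start = None
--     cand = None
--     for i, line in enumerate(lines):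
--         if line.rstrip() == '---':
--             if start is None:
--                 start = i
--             else:
--                 if cand is not None:
--                     return lines[:cand] + lines[cand + 1:], True
--                 return lines, False
--         elif start is not None and cand is None and line.strip().startswith('confluenceUrl:'):
--             cand = i
--     return lines, False
-- ===== Notes on version B (the rewrite author's own statement) =====
-- stated objective: alternative
-- what changed: Replaced the two-phase design (a bounds helper scanning for both fences, then a separate indexed scan of range(start+1,end)) with a single stateful pass over enumerate(lines) that records the first fence and the first confluenceUrl candidate and decides at the second fence.
import Mathlib
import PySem

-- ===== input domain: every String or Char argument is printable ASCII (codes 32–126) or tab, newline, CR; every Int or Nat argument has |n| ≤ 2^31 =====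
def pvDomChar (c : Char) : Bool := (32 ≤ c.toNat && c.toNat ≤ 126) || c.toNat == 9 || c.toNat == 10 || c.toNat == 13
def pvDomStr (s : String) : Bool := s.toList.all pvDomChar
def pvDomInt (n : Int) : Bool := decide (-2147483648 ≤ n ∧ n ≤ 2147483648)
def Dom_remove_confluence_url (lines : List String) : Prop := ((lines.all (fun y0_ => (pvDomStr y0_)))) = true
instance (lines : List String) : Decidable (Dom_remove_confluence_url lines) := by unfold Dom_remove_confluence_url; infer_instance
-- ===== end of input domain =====

-- B replaces A's two separate scans (bounds helper + inner index scan) with one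
-- stateful pass that records the first fence and the first confluenceUrl candidate;
-- objective: alternative decomposition, same exact result.


-- ===== PORT A =====
-- the match test on a line, exactly Python's lines[i].strip().startswith('confluenceUrl:')
def pvIsConf (s : String) : Bool := PySem.Str.startswith (PySem.Str.strip s) "confluenceUrl:"

-- _find_frontmatter_bounds: loop over enumerate(lines) with state `start`
def pvFbAux : List String → Nat → Option Nat → Option (Nat × Nat)
  | [], _, _ => none
  | l :: rest, i, start =>
    if PySem.Str.rstrip l == "---" then
      match start with
      | none => pvFbAux rest (i + 1) (some i)
      | some s => some (s, i)
    else pvFbAux rest (i + 1) start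

-- for i in range(start+1, end): if lines[i] matches → lines[:i] + lines[i+1:]
def pvScanA (lines : List String) (i e : Nat) : List String × Bool :=
  if i < e then
    if pvIsConf (lines.getD i "") then (lines.take i ++ lines.drop (i + 1), true)
    else pvScanA lines (i + 1) e
  else (lines, false)
termination_by e - i

def remove_confluence_url (lines : List String) : List String × Bool :=
  match pvFbAux lines 0 none with
  | none => (lines, false)
  | some (s, e) => pvScanA lines (s + 1) e

-- ===== PORT B =====
-- single pass with state (start, cand) over enumerate(lines)
def pvAltAux (lines : List String) : List String → Nat → Option Nat → Option Nat → List String × Bool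
  | [], _, _, _ => (lines, false)
  | l :: rest, i, start, cand =>
    if PySem.Str.rstrip l == "---" then
      match start with
      | none => pvAltAux lines rest (i + 1) (some i) cand
      | some _ =>
        match cand with
        | some c => (lines.take c ++ lines.drop (c + 1), true)
        | none => (lines, false)
    else
      if start.isSome && cand.isNone && pvIsConf l then
        pvAltAux lines rest (i + 1) start (some i)
      else
        pvAltAux lines rest (i + 1) start cand

def remove_confluence_url_alt (lines : List String) : List String × Bool :=
  pvAltAux lines lines 0 none none

-- ===== PRECONDITION & SPEC =====
def Spec_remove_confluence_url (lines : List String) (out : List String × Bool) : Prop := out = remove_confluence_url_alt lines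
instance (lines : List String) (out : List String × Bool) : Decidable (Spec_remove_confluence_url lines out) := by unfold Spec_remove_confluence_url; infer_instance

-- ===== CLAIM (what is proved, stated in full; the proofs are below) =====
def Claim_equal_remove_confluence_url : Prop := ∀ (lines : List String), Dom_remove_confluence_url lines → Spec_remove_confluence_url lines (remove_confluence_url lines)

-- ===== LEMMAS AND PROOFS =====

-- suffix bookkeeping
theorem pv_drop_cons {lines rest : List String} {l : String} {i : Nat}
    (h : lines.drop i = l :: rest) : lines.getD i "" = l ∧ lines.drop (i + 1) = rest := by
  constructor
  · have h0 : (lines.drop i)[0]? = some l := by simp [h]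
    rw [List.getElem?_drop] at h0
    have h0' : lines[i]? = some l := by simpa using h0
    simp [List.getD, h0']
  · have : lines.drop (i + 1) = (lines.drop i).drop 1 := by
      rw [List.drop_drop]
    simp [this, h]

-- a scan interval with no match returns (lines, false)
theorem pvScanA_none (lines : List String) (e : Nat) :
    ∀ i, (∀ j, i ≤ j → j < e → pvIsConf (lines.getD j "") = false) →
      pvScanA lines i e = (lines, false) := by
  intro i
  induction' hw : e - i using Nat.strong_induction_on with n ih generalizing i
  intro hno
  rw [pvScanA]
  by_cases hlt : i < e
  · rw [if_pos hlt, if_neg (by rw [hno i le_rfl hlt]; exact Bool.false_ne_true)]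
    exact ih (e - (i + 1)) (by omega) (i + 1) rfl
      (fun j hj1 hj2 => hno j (by omega) hj2)
  · rw [if_neg hlt]

-- a scan whose first match is at c < e returns the spliced list
theorem pvScanA_hit (lines : List String) (e c : Nat)
    (hc : c < e) (hm : pvIsConf (lines.getD c "") = true) :
    ∀ i, i ≤ c → (∀ j, i ≤ j → j < c → pvIsConf (lines.getD j "") = false) →
      pvScanA lines i e = (lines.take c ++ lines.drop (c + 1), true) := by
  intro i
  induction' hw : c - i using Nat.strong_induction_on with n ih generalizing i
  intro hic hno
  rw [pvScanA]
  by_cases hi : i = c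
  · subst hi; rw [if_pos hc, if_pos hm]
  · have hlt : i < e := by omega
    rw [if_pos hlt, if_neg (by rw [hno i le_rfl (by omega)]; exact Bool.false_ne_true)]
    exact ih (c - (i + 1)) (by omega) (i + 1) rfl (by omega)
      (fun j hj1 hj2 => hno j (by omega) hj2)

-- phase 2: after the first fence at s, B's stateful pass agrees with fbAux + scanA
theorem pv_phase2 (lines : List String) :
    ∀ rest i s cand, lines.drop i = rest → s + 1 ≤ i →
    (cand = none → ∀ j, s + 1 ≤ j → j < i → pvIsConf (lines.getD j "") = false) →
    (∀ c, cand = some c → s + 1 ≤ c ∧ c < i ∧ pvIsConf (lines.getD c "") = true ∧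
        ∀ j, s + 1 ≤ j → j < c → pvIsConf (lines.getD j "") = false) →
    pvAltAux lines rest i (some s) cand =
      match pvFbAux rest i (some s) with
      | none => (lines, false)
      | some (_, e) => pvScanA lines (s + 1) e := by
  intro rest
  induction rest with
  | nil => intro i s cand _ _ _ _; simp only [pvAltAux, pvFbAux]
  | cons l rest ih =>
    intro i s cand hdrop hsi hnone hsome
    obtain ⟨hget, hdrop'⟩ := pv_drop_cons hdrop
    simp only [pvAltAux, pvFbAux]
    by_cases hf : PySem.Str.rstrip l == "---"
    · -- second fence: decide
      rw [if_pos hf, if_pos hf]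
      cases cand with
      | none =>
        exact (pvScanA_none lines i (s + 1) (fun j hj1 hj2 => hnone rfl j hj1 hj2)).symm
      | some c =>
        obtain ⟨hc1, hc2, hc3, hc4⟩ := hsome c rfl
        exact (pvScanA_hit lines i c hc2 hc3 (s + 1) hc1 (fun j hj1 hj2 => hc4 j hj1 hj2)).symm
    · -- not a fence
      rw [if_neg hf, if_neg hf]
      cases cand with
      | none =>
        by_cases hm : pvIsConf l
        · -- record candidate i
          rw [if_pos (by simp [hm])]
          exact ih (i + 1) s (some i) hdrop' (by omega)
            (by intro h; cases h)
            (by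
              intro c hc; cases hc
              exact ⟨hsi, by omega, by rw [hget]; exact hm,
                fun j hj1 hj2 => hnone rfl j hj1 hj2⟩)
        · rw [if_neg (by simp [hm])]
          exact ih (i + 1) s none hdrop' (by omega)
            (by
              intro _ j hj1 hj2
              by_cases hji : j = i
              · subst hji; rw [hget]; simpa using hm
              · exact hnone rfl j hj1 (by omega))
            (by intro c hc; cases hc)
      | some c =>
        obtain ⟨hc1, hc2, hc3, hc4⟩ := hsome c rfl
        rw [if_neg (by simp)]
        exact ih (i + 1) s (some c) hdrop' (by omega)
          (by intro h; cases h)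
          (by intro c' hc'; cases hc'; exact ⟨hc1, by omega, hc3, hc4⟩)

-- with start = some s, fbAux always reports s as the first component
theorem pvFbAux_fst : ∀ (rest : List String) (i s p e : Nat),
    pvFbAux rest i (some s) = some (p, e) → p = s := by
  intro rest
  induction rest with
  | nil => intro i s p e h; simp only [pvFbAux] at h; cases h
  | cons l rest ih =>
    intro i s p e h
    simp only [pvFbAux] at h
    by_cases hf : PySem.Str.rstrip l == "---"
    · rw [if_pos hf] at h
      cases h
      rfl
    · rw [if_neg hf] at h
      exact ih (i + 1) s p e h

-- phase 1: before any fence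
theorem pv_phase1 (lines : List String) :
    ∀ rest i, lines.drop i = rest →
    pvAltAux lines rest i none none =
      match pvFbAux rest i none with
      | none => (lines, false)
      | some (s, e) => pvScanA lines (s + 1) e := by
  intro rest
  induction rest with
  | nil => intro i _; simp only [pvAltAux, pvFbAux]
  | cons l rest ih =>
    intro i hdrop
    obtain ⟨_, hdrop'⟩ := pv_drop_cons hdrop
    simp only [pvAltAux, pvFbAux]
    by_cases hf : PySem.Str.rstrip l == "---"
    · -- first fence at i: enter phase 2
      rw [if_pos hf, if_pos hf]
      rw [pv_phase2 lines rest (i + 1) i none hdrop' (by omega)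
        (by intro _ j hj1 hj2; omega) (by intro c hc; cases hc)]
      cases hfb : pvFbAux rest (i + 1) (some i) with
      | none => rfl
      | some pe =>
        obtain ⟨p, e⟩ := pe
        have := pvFbAux_fst rest (i + 1) i p e hfb
        subst this
        rfl
    · rw [if_neg hf, if_neg hf]
      exact ih (i + 1) hdrop'

-- ===== VERDICT (by name: the statement is the Claim_ definition above) =====
theorem remove_confluence_url_spec : Claim_equal_remove_confluence_url := by
  intro lines _
  unfold Spec_remove_confluence_url remove_confluence_url remove_confluence_url_alt
  rw [pv_phase1 lines lines 0 (by simp)]
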